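-- pv_equiv track=rewrite | github.com/yclee126/drag-and-number | tpp.py | find_end
-- ===== SOURCE A (Python) =====
-- def find_end(string):
--     ignore = False
--     length = len(string)
--     for i, char in enumerate(string):
--         if char == '\\':
--             ignore = True
--         elif char == ' ' and not ignore:
--             return i - 1
--         else:
--             ignore = False
--     return length - 1
-- ===== SOURCE B (Python) =====
-- def find_end(string):
--     # Staged approach: cut the string at every space with split(' '); the first
--     # unescaped space is the boundary after the first piece that does not end
--     # with a backslash.  pos tracks the index of the space following each piece.
--     pos = -1
--     for seg in string.split(' ')[:-1]:
--         pos += len(seg) + 1          # index of the space right after seg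
--         if not seg.endswith('\\'):
--             return pos - 1
--     return len(string) - 1
-- ===== Notes on version B (the rewrite author's own statement) =====
-- stated objective: faster
-- what changed: B replaces A's per-character scan with a mutable escape flag by a staged computation: split the string at every space, walk the pieces accumulating their lengths, and return the boundary after the first piece that does not end in a backslash.
import Mathlib
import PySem

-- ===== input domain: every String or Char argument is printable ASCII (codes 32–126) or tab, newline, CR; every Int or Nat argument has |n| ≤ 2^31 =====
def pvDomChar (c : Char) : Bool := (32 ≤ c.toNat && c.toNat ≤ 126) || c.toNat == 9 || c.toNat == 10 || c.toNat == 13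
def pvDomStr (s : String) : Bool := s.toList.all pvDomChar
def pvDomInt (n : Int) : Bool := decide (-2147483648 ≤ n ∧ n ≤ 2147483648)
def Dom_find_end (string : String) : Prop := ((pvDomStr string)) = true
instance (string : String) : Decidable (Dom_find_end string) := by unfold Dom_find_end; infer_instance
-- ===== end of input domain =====

-- B replaces A's per-character escape-flag scan by a staged split(' ')-and-walk over the pieces (same O(n), constant-factor faster via the C-level split).

-- ===== PORT A =====
-- A's for-loop over enumerate(string) with the 'ignore' flag; i is the running index.
def findEndALoop : List Char → Int → Bool → Int → Int
  | [], _, _, length => length - 1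
  | c :: rest, i, ignore, length =>
    if c = '\\' then findEndALoop rest (i + 1) true length
    else if c = ' ' ∧ ignore = false then i - 1
    else findEndALoop rest (i + 1) false length

def find_end (string : String) : Int :=
  findEndALoop string.toList 0 false (string.toList.length : Int)

-- ===== PORT B =====
-- seg.endswith('\\')
def segEndsBS (seg : List Char) : Bool :=
  PySem.Chars.endswith seg ['\\']

-- B's for-loop over the split pieces, accumulating pos (index of the space after each piece).
def findEndBLoop (total : Int) : List (List Char) → Int → Int
  | [], _ => total - 1
  | seg :: rest, pos =>
    let pos' := pos + (seg.length : Int) + 1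
    if segEndsBS seg = false then pos' - 1 else findEndBLoop total rest pos'

-- string.split(' ') ported as List.splitOn ' ' (the corresponding library function); [:-1] is dropLast.
def find_end_alt (string : String) : Int :=
  findEndBLoop (string.toList.length : Int) ((string.toList.splitOn ' ').dropLast) (-1)

-- ===== PRECONDITION & SPEC =====
def Spec_find_end (string : String) (out : Int) : Prop := out = find_end_alt string
instance (string : String) (out : Int) : Decidable (Spec_find_end string out) := by unfold Spec_find_end; infer_instance

-- ===== CLAIM (what is proved, stated in full; the proofs are below) =====
def Claim_equal_find_end : Prop := ∀ (string : String), Dom_find_end string → Spec_find_end string (find_end string)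

-- ===== LEMMAS AND PROOFS =====

-- A's flag at the end of a piece: last char is backslash, or (empty piece) the incoming flag.
def flagEnd (b : Bool) (seg : List Char) : Bool :=
  match seg.getLast? with
  | some c => decide (c = '\\')
  | none => b

-- Generalisation of findEndBLoop carrying the incoming flag for the first (possibly empty) piece.
def goB (total : Int) : List (List Char) → Int → Bool → Int
  | [], _, _ => total - 1
  | seg :: rest, pos, b =>
    let pos' := pos + (seg.length : Int) + 1
    if flagEnd b seg = false then pos' - 1 else goB total rest pos' false

theorem segEndsBS_eq_flagEnd_false (seg : List Char) : segEndsBS seg = flagEnd false seg := by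
  rcases List.eq_nil_or_concat seg with rfl | ⟨xs, x, rfl⟩
  · decide
  · rw [List.concat_eq_append]
    have hl : (xs ++ [x]).getLast? = some x := by simp
    have h1 : flagEnd false (xs ++ [x]) = decide (x = '\\') := by
      simp [flagEnd, hl]
    rw [h1]
    by_cases hx : x = '\\'
    · subst hx
      simp [segEndsBS]
      rw [PySem.Chars.endswith_iff]
      exact ⟨xs, rfl⟩
    · have hns : ¬ ['\\'] <:+ (xs ++ [x]) := by
        rintro ⟨t, ht⟩
        have h2 := (List.append_inj' ht rfl).2
        simp at h2
        exact hx h2.symm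
      simp only [segEndsBS, decide_eq_false hx]
      rw [Bool.eq_false_iff]
      intro h
      exact hns ((PySem.Chars.endswith_iff _ _).mp h)

theorem goB_false (total : Int) (segs : List (List Char)) (pos : Int) :
    goB total segs pos false = findEndBLoop total segs pos := by
  induction segs generalizing pos with
  | nil => rfl
  | cons seg rest ih =>
    simp only [goB, findEndBLoop, segEndsBS_eq_flagEnd_false]
    split_ifs with h
    · rfl
    · exact ih _

theorem flagEnd_cons (b : Bool) (c : Char) (seg : List Char) :
    flagEnd b (c :: seg) = flagEnd (decide (c = '\\')) seg := by
  cases seg with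
  | nil => simp [flagEnd]
  | cons d rest =>
    rcases h : (d :: rest).getLast? with _ | y
    · simp at h
    · simp [flagEnd, List.getLast?_cons_cons, h]

theorem splitOn_char_cons (c : Char) (cs : List Char) (x : Char) :
    (c :: cs).splitOn x
      = if c = x then [] :: cs.splitOn x else (cs.splitOn x).modifyHead (List.cons c) := by
  simp [List.splitOn, List.splitOnP_cons]

theorem main_eq (cs : List Char) : ∀ (p total : Int) (b : Bool),
    findEndALoop cs p b total = goB total ((cs.splitOn ' ').dropLast) (p - 1) b := by
  induction cs with
  | nil => intro p total b; rfl
  | cons c cs' ih =>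
    intro p total b
    obtain ⟨seg0, rest, hsp⟩ := List.exists_cons_of_ne_nil
      (List.splitOnP_ne_nil (fun a => a == ' ') cs')
    have hsp' : cs'.splitOn ' ' = seg0 :: rest := hsp
    by_cases hc : c = ' '
    · subst hc
      have hsplit : (' ' :: cs').splitOn ' ' = [] :: (seg0 :: rest) := by
        rw [splitOn_char_cons, if_pos rfl, hsp']
      rw [hsplit, List.dropLast_cons₂]
      cases b with
      | false =>
        have hA : findEndALoop (' ' :: cs') p false total = p - 1 := by
          simp [findEndALoop]
        rw [hA]
        simp [goB, flagEnd]
      | true =>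
        have hA : findEndALoop (' ' :: cs') p true total
            = findEndALoop cs' (p + 1) false total := by
          simp [findEndALoop]
        rw [hA, ih, hsp']
        simp only [goB, flagEnd, List.getLast?_nil, List.length_nil]
        norm_num
    · have hA : findEndALoop (c :: cs') p b total
          = findEndALoop cs' (p + 1) (decide (c = '\\')) total := by
        by_cases hbs : c = '\\' <;> simp [findEndALoop, hc, hbs]
      rw [splitOn_char_cons, if_neg hc, hsp', hA, ih, hsp']
      cases rest with
      | nil => rfl
      | cons r rs =>
        simp only [List.modifyHead, List.dropLast_cons₂, goB, flagEnd_cons]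
        have hpos : p - 1 + ((c :: seg0).length : Int) + 1
            = p + 1 - 1 + (seg0.length : Int) + 1 := by
          push_cast [List.length_cons]; ring
        rw [hpos]

-- ===== VERDICT (by name: the statement is the Claim_ definition above) =====
theorem find_end_spec : Claim_equal_find_end := by
  intro s _
  unfold Spec_find_end find_end find_end_alt
  rw [main_eq, goB_false]
  norm_num
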